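-- pv_equiv track=rewrite | github.com/MarupatiAkshayaReddy/High-end-training- | DAY-12 14-06-2024/twolistevenodd.py | eofun
-- ===== SOURCE A (Python) =====
-- def eofun(l1,l2,el,ol,e):
--     if e<len(l1):
--         if l1[e]%2==0:
--             el.append(l1[e])
--         if l2[e]%2!=0:
--             ol.append(l2[e])
--         eofun(l1,l2,el,ol,e+1)
--     return (el,ol)
-- ===== SOURCE B (Python) =====
-- def eofun(l1, l2, el, ol, e):
--     idx = range(e, len(l1))
--     el.extend(l1[i] for i in idx if l1[i] % 2 == 0)
--     ol.extend(l2[i] for i in idx if l2[i] % 2 != 0)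
--     return (el, ol)
-- ===== Notes on version B (the rewrite author's own statement) =====
-- stated objective: idiomatic
-- what changed: Replaces the recursion with a single range over the same indices and two filtered generator extends, one per output list, instead of per-index recursive appends.
import Mathlib
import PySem

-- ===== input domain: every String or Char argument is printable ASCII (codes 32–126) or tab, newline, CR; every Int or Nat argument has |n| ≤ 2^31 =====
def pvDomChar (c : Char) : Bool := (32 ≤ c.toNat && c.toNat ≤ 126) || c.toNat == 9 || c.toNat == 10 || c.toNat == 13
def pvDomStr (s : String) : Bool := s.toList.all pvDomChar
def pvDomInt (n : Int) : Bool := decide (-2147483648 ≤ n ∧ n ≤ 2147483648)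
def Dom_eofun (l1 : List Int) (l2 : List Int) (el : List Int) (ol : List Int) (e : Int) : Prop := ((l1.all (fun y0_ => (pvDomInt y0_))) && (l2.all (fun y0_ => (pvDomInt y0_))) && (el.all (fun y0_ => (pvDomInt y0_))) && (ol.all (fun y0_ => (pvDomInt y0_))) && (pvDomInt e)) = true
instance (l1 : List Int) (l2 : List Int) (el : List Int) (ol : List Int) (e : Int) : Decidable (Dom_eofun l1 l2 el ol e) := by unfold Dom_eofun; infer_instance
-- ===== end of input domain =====

-- B replaces A's per-index recursion with one index range and two filtered extends (idiomatic, same cost).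
-- A mutates el/ol in place (B performs the same mutation); the equivalence proved is about the return value.

-- ===== PORT A =====
-- literal port of the recursion; on an out-of-range access (Python IndexError, excluded by Pre_) pyGet? gives none, read as 0
def eofun (l1 : List Int) (l2 : List Int) (el : List Int) (ol : List Int) (e : Int) : List Int × List Int :=
  if _h : e < (l1.length : Int) then
    let a := (PySem.List.pyGet? l1 e).getD 0
    let b := (PySem.List.pyGet? l2 e).getD 0
    let el' := if PySem.Int.mod a 2 = 0 then el ++ [a] else el
    let ol' := if PySem.Int.mod b 2 ≠ 0 then ol ++ [b] else ol
    eofun l1 l2 el' ol' (e + 1)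
  else (el, ol)
termination_by ((l1.length : Int) - e).toNat
decreasing_by omega

-- ===== PORT B =====
def eofun_alt (l1 : List Int) (l2 : List Int) (el : List Int) (ol : List Int) (e : Int) : List Int × List Int :=
  let idx := PySem.List.pyRange e (l1.length : Int) 1
  let el' := el ++ (idx.filter (fun i => PySem.Int.mod ((PySem.List.pyGet? l1 i).getD 0) 2 = 0)).map
                     (fun i => (PySem.List.pyGet? l1 i).getD 0)
  let ol' := ol ++ (idx.filter (fun i => PySem.Int.mod ((PySem.List.pyGet? l2 i).getD 0) 2 ≠ 0)).map
                     (fun i => (PySem.List.pyGet? l2 i).getD 0)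
  (el', ol')

-- ===== PRECONDITION & SPEC =====
-- Pre_ excludes exactly the inputs where Python A raises IndexError: an index in [e, len l1) out of range for l1 or l2
def Pre_eofun (l1 : List Int) (l2 : List Int) (el : List Int) (ol : List Int) (e : Int) : Prop :=
  (l1.length : Int) ≤ e ∨ (-(l1.length : Int) ≤ e ∧ -(l2.length : Int) ≤ e ∧ l1.length ≤ l2.length)
instance (l1 : List Int) (l2 : List Int) (el : List Int) (ol : List Int) (e : Int) : Decidable (Pre_eofun l1 l2 el ol e) := by unfold Pre_eofun; infer_instance
def pvWitness_eofun : List Int × List Int × List Int × List Int × Int := ([2, 3], [4, 5], [], [], 0)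

def Spec_eofun (l1 : List Int) (l2 : List Int) (el : List Int) (ol : List Int) (e : Int) (out : List Int × List Int) : Prop := out = eofun_alt l1 l2 el ol e
instance (l1 : List Int) (l2 : List Int) (el : List Int) (ol : List Int) (e : Int) (out : List Int × List Int) : Decidable (Spec_eofun l1 l2 el ol e out) := by unfold Spec_eofun; infer_instance

-- ===== CLAIM (what is proved, stated in full; the proofs are below) =====
def Claim_equal_eofun : Prop := ∀ (l1 : List Int) (l2 : List Int) (el : List Int) (ol : List Int) (e : Int), Dom_eofun l1 l2 el ol e → Pre_eofun l1 l2 el ol e → Spec_eofun l1 l2 el ol e (eofun l1 l2 el ol e)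

-- ===== LEMMAS AND PROOFS =====

-- A equals B unconditionally (both ports read missing indices as 0); Pre_ only pins the Python raise set
theorem eofun_eq_alt (l1 l2 : List Int) : ∀ (n : Nat) (el ol : List Int) (e : Int),
    ((l1.length : Int) - e).toNat = n → eofun l1 l2 el ol e = eofun_alt l1 l2 el ol e := by
  intro n
  induction n with
  | zero =>
    intro el ol e hn
    rw [eofun, dif_neg (by omega), eofun_alt, PySem.List.pyRange_one_eq_nil (by omega)]
    simp
  | succ n ih =>
    intro el ol e hn
    by_cases h : e < (l1.length : Int)
    · rw [eofun, dif_pos h]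
      simp only []
      rw [ih _ _ (e + 1) (by omega)]
      rw [eofun_alt, eofun_alt]
      rw [PySem.List.pyRange_one_cons h]
      simp only [List.filter_cons, decide_eq_true_eq, Prod.ext_iff]
      constructor <;> split_ifs with h1 h2 <;> simp_all [List.append_assoc]
    · rw [eofun, dif_neg h, eofun_alt, PySem.List.pyRange_one_eq_nil (by omega)]
      simp

-- ===== VERDICT (by name: the statement is the Claim_ definition above) =====
theorem eofun_spec : Claim_equal_eofun := by
  intro l1 l2 el ol e _ _
  exact eofun_eq_alt l1 l2 _ el ol e rfl
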